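-- pv_equiv track=rewrite | github.com/19bischof/cute_programs | Viper/riddle_me_timbers/river_agents.py | order_str
-- ===== SOURCE A (Python) =====
-- def order_str(s):
--     up, low = "", ""
--     for c in s:
--         if c.upper() == c:
--             up += c
--         else:
--             low += c
--     up = sorted(up)
--     low = sorted(low)
--     return ''.join(low)+''.join(up)
-- ===== SOURCE B (Python) =====
-- def order_str(s):
--     return ''.join(sorted(s, key=lambda c: (c.upper() == c, c)))
-- ===== Notes on version B (the rewrite author's own statement) =====
-- stated objective: idiomatic
-- what changed: Replaces the explicit partition loop and two separate sorts with one keyed sort whose tuple key (c.upper()==c, c) puts the lowercase bucket first and sorts within each bucket.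
import Mathlib
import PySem

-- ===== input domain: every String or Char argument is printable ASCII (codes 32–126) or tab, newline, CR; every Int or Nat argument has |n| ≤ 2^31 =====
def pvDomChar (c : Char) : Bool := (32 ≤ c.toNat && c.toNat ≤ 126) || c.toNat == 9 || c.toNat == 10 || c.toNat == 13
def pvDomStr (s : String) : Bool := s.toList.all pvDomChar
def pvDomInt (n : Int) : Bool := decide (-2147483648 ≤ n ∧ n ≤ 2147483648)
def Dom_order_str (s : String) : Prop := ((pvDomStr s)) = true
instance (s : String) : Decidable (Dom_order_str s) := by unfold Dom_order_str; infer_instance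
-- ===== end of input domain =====

-- B replaces A's explicit partition loop and two separate sorts with one keyed sort
-- (tuple key: bucket first, character second) — an idiomatic decomposition, same cost.


-- ===== PORT A =====
def order_str (s : String) : String :=
  let p := s.toList.foldl
    (fun (p : String × String) c =>
      if PySem.Chars.upperChar c == c then (p.1.push c, p.2) else (p.1, p.2.push c))
    ("", "")
  let up := PySem.List.sorted p.1.toList (fun c => c) false
  let low := PySem.List.sorted p.2.toList (fun c => c) false
  String.ofList low ++ String.ofList up

-- ===== PORT B =====
def order_str_alt (s : String) : String :=
  String.ofList
    (PySem.List.sorted2 s.toList (fun c => PySem.Chars.upperChar c == c) (fun c => c) false)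

-- ===== PRECONDITION & SPEC =====
def Spec_order_str (s : String) (out : String) : Prop := out = order_str_alt s
instance (s : String) (out : String) : Decidable (Spec_order_str s out) := by unfold Spec_order_str; infer_instance

-- ===== CLAIM (what is proved, stated in full; the proofs are below) =====
def Claim_equal_order_str : Prop := ∀ (s : String), Dom_order_str s → Spec_order_str s (order_str s)

-- ===== LEMMAS AND PROOFS =====

def pvB (c : Char) : Bool := PySem.Chars.upperChar c == c

theorem pv_insertBy_cons {α : Type} (before : α → α → Bool) (x y : α) (ys : List α) :
    PySem.List.insertBy before x (y :: ys)
      = if before x y then x :: y :: ys else y :: PySem.List.insertBy before x ys := by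
  simp [PySem.List.insertBy]

theorem pv_insertBy_append_left {α : Type} (before : α → α → Bool) (x : α) (L U : List α)
    (h : ∀ u ∈ U, before x u = true) :
    PySem.List.insertBy before x (L ++ U) = PySem.List.insertBy before x L ++ U := by
  induction L with
  | nil =>
    cases U with
    | nil => simp [PySem.List.insertBy]
    | cons u us => simp [PySem.List.insertBy, h u (by simp)]
  | cons y L ih =>
    simp only [List.cons_append, pv_insertBy_cons]
    by_cases hb : before x y = true <;> simp [hb, ih]

theorem pv_insertBy_append_right {α : Type} (before : α → α → Bool) (x : α) (L U : List α)
    (h : ∀ y ∈ L, before x y = false) :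
    PySem.List.insertBy before x (L ++ U) = L ++ PySem.List.insertBy before x U := by
  induction L with
  | nil => simp
  | cons y L ih =>
    simp only [List.cons_append, pv_insertBy_cons, h y (by simp)]
    simp
    exact ih (fun z hz => h z (by simp [hz]))

theorem pv_insertBy_congr {α : Type} (f g : α → α → Bool) (x : α) (ys : List α)
    (h : ∀ y ∈ ys, f x y = g x y) :
    PySem.List.insertBy f x ys = PySem.List.insertBy g x ys := by
  induction ys with
  | nil => rfl
  | cons y ys ih =>
    simp only [pv_insertBy_cons, h y (by simp)]
    rw [ih (fun z hz => h z (by simp [hz]))]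

theorem pv_sorted_concat {α κ : Type} [LT κ] [DecidableLT κ] (xs : List α) (x : α) (key : α → κ) :
    PySem.List.sorted (xs ++ [x]) key false
      = PySem.List.insertBy (fun a b => decide (key a < key b)) x
          (PySem.List.sorted xs key false) := by
  rw [PySem.List.sorted_eq_foldl_insertBy, PySem.List.sorted_eq_foldl_insertBy,
    List.foldl_append]
  rfl

theorem pv_sorted2_concat {α κ₁ κ₂ : Type} [LT κ₁] [DecidableLT κ₁] [LT κ₂] [DecidableLT κ₂]
    (xs : List α) (x : α) (k1 : α → κ₁) (k2 : α → κ₂) :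
    PySem.List.sorted2 (xs ++ [x]) k1 k2 false
      = PySem.List.insertBy
          (fun a b => decide (k1 a < k1 b) || (!decide (k1 b < k1 a) && decide (k2 a < k2 b)))
          x (PySem.List.sorted2 xs k1 k2 false) := by
  simp [PySem.List.sorted2, List.foldl_append]

theorem pv_main (cs : List Char) :
    PySem.List.sorted2 cs (fun c => pvB c) (fun c => c) false
      = PySem.List.sorted (cs.filter (fun c => !pvB c)) (fun c => c) false
        ++ PySem.List.sorted (cs.filter (fun c => pvB c)) (fun c => c) false := by
  induction cs using List.reverseRecOn with
  | nil => rfl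
  | append_singleton xs x ih =>
    rw [pv_sorted2_concat, ih]
    by_cases hx : pvB x = true
    · rw [List.filter_append, List.filter_append]
      simp only [List.filter_cons, List.filter_nil, hx, Bool.not_true,
        Bool.false_eq_true, if_true, if_false, List.append_nil]
      rw [pv_sorted_concat]
      rw [pv_insertBy_append_right]
      · congr 1
        apply pv_insertBy_congr
        intro y hy
        have hyb : pvB y = true := by
          rw [PySem.List.mem_sorted] at hy
          exact (List.mem_filter.mp hy).2
        simp [hx, hyb]
      · intro y hy
        have hyb : pvB y = false := by
          rw [PySem.List.mem_sorted] at hy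
          have := (List.mem_filter.mp hy).2
          simpa using this
        simp [hx, hyb]
    · have hx' : pvB x = false := by simpa using hx
      rw [List.filter_append, List.filter_append]
      simp only [List.filter_cons, List.filter_nil, hx', Bool.not_false,
        Bool.false_eq_true, if_true, if_false, List.append_nil]
      rw [pv_sorted_concat]
      rw [pv_insertBy_append_left]
      · congr 1
        apply pv_insertBy_congr
        intro y hy
        have hyb : pvB y = false := by
          rw [PySem.List.mem_sorted] at hy
          have := (List.mem_filter.mp hy).2
          simpa using this
        simp [hx', hyb]
      · intro u hu
        have hub : pvB u = true := by
          rw [PySem.List.mem_sorted] at hu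
          exact (List.mem_filter.mp hu).2
        simp [hx', hub]

theorem pv_fold (cs : List Char) : ∀ (u l : String),
    ((cs.foldl
      (fun (p : String × String) c =>
        if PySem.Chars.upperChar c == c then (p.1.push c, p.2) else (p.1, p.2.push c))
      (u, l)).1.toList = u.toList ++ cs.filter (fun c => pvB c)
    ∧ (cs.foldl
      (fun (p : String × String) c =>
        if PySem.Chars.upperChar c == c then (p.1.push c, p.2) else (p.1, p.2.push c))
      (u, l)).2.toList = l.toList ++ cs.filter (fun c => !pvB c)) := by
  induction cs with
  | nil => intro u l; simp
  | cons c cs ih =>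
    intro u l
    simp only [List.foldl_cons, List.filter_cons]
    by_cases hc : pvB c = true
    · have hc' : (PySem.Chars.upperChar c == c) = true := hc
      simpa [hc', hc, String.toList_push] using ih (u.push c) l
    · have hc2 : pvB c = false := by simpa using hc
      have hc' : (PySem.Chars.upperChar c == c) = false := hc2
      simpa [hc', hc2, String.toList_push] using ih u (l.push c)

-- ===== VERDICT (by name: the statement is the Claim_ definition above) =====
theorem order_str_spec : Claim_equal_order_str := by
  intro s _
  unfold Spec_order_str order_str order_str_alt
  have hf := pv_fold s.toList "" ""
  rw [← String.toList_inj]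
  simp only [String.toList_append, String.toList_ofList]
  rw [hf.1, hf.2]
  simp only [String.toList_empty, List.nil_append]
  exact (pv_main s.toList).symm
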